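-- pv_equiv track=rewrite | github.com/GirishNekar/ML_Basics | List_Python/identical_circular.py | are_circularly_identical
-- ===== SOURCE A (Python) =====
-- def are_circularly_identical(list1, list2):
--
--
--     """
--
--     Description:
--         Checks whether two lists are circularly identical.
--
--     Parameters:
--         list1 (list): The first list to compare.
--         list2 (list): The second list to compare.
--
--     Returns:
--         bool: True if the lists are circularly identical, False otherwise.
--
--     """
--
--
--     if len(list1) != len(list2):
--         return False
--
--     combined_list = list1 + list1
--     for i in range(len(list1)):
--         if combined_list[i:i + len(list2)] == list2:
--             return True
--     return False
-- ===== SOURCE B (Python) =====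
-- def are_circularly_identical(list1, list2):
--     """Rotation check via a position index: build a dict mapping each value to
--     its positions in list1 once, then verify only the offsets where list1 has
--     list2's first element, instead of scanning every offset."""
--     if len(list1) != len(list2):
--         return False
--     if not list2:
--         return True
--     index = {}
--     for i, v in enumerate(list1):
--         index[v] = index.get(v, []) + [i]
--     doubled = list1 + list1
--     n = len(list1)
--     for i in index.get(list2[0], []):
--         if doubled[i:i + n] == list2:
--             return True
--     return False
-- ===== Notes on version B (the rewrite author's own statement) =====
-- stated objective: faster
-- what changed: B builds a value-to-positions dict over list1 once and verifies only the offsets whose element equals list2[0], instead of slice-comparing list2 against every offset of the doubled list.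
-- intended difference: On two empty lists A's loop body never runs and A returns False, while B returns True, which is intended since the empty list is a rotation of itself. — e.g. on are_circularly_identical([], []): A returns false, B returns true
import Mathlib
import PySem

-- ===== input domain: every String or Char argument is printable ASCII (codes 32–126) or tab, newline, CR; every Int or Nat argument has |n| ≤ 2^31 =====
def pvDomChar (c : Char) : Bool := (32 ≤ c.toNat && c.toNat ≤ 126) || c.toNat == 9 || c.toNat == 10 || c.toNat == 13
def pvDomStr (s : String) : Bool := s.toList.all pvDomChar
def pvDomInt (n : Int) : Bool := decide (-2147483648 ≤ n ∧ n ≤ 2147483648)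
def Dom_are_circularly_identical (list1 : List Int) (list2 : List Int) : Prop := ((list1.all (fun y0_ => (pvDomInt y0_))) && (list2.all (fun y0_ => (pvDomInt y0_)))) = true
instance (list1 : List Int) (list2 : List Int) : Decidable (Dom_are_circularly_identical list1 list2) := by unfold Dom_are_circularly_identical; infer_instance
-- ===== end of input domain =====

-- B indexes the positions of each value of list1 in a dict built once and verifies only the offsets carrying list2's
-- first element (instead of slice-comparing at every offset); on two empty lists A returns False, B returns True (intended).


-- ===== PORT A =====
def are_circularly_identical (list1 : List Int) (list2 : List Int) : Bool :=
  if list1.length ≠ list2.length then false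
  else
    let combined := list1 ++ list1
    -- for i in range(len(list1)): if combined[i:i+len(list2)] == list2: return True
    (PySem.List.pyRange 0 (list1.length : Int) 1).any
      (fun i => PySem.List.slice combined (some i) (some (i + (list2.length : Int))) == list2)

-- ===== PORT B =====
def are_circularly_identical_alt (list1 : List Int) (list2 : List Int) : Bool :=
  if list1.length ≠ list2.length then false
  else if list2.isEmpty then true
  else
    -- index[v] = index.get(v, []) + [i] for i, v in enumerate(list1)
    let index : PySem.Dict Int (List Int) :=
      (PySem.List.enumerate list1 0).foldl
        (fun d p => d.insert p.2 (d.getD p.2 [] ++ [p.1])) PySem.Dict.empty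
    let doubled := list1 ++ list1
    let n := (list1.length : Int)
    (index.getD (PySem.List.pyGetD list2 0 0) []).any
      (fun i => PySem.List.slice doubled (some i) (some (i + n)) == list2)

-- ===== PRECONDITION & SPEC =====
-- On two empty lists A's loop body never runs and A returns False, while B returns True,
-- which is intended since the empty list is a rotation of itself.
def D_are_circularly_identical (list1 : List Int) (list2 : List Int) : Prop :=
  list1 = [] ∧ list2 = []
instance (list1 : List Int) (list2 : List Int) : Decidable (D_are_circularly_identical list1 list2) := by
  unfold D_are_circularly_identical; infer_instance

def Spec_are_circularly_identical (list1 : List Int) (list2 : List Int) (out : Bool) : Prop :=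
  ¬ D_are_circularly_identical list1 list2 → out = are_circularly_identical_alt list1 list2
instance (list1 : List Int) (list2 : List Int) (out : Bool) : Decidable (Spec_are_circularly_identical list1 list2 out) := by
  unfold Spec_are_circularly_identical; infer_instance

def pvDiffWitness_are_circularly_identical : List Int × List Int := ([], [])
def pvDiffWitnessOut_are_circularly_identical : Bool × Bool := (false, true)

-- ===== CLAIM (what is proved, stated in full; the proofs are below) =====
def Claim_unchanged_are_circularly_identical : Prop := ∀ (list1 : List Int) (list2 : List Int), Dom_are_circularly_identical list1 list2 → Spec_are_circularly_identical list1 list2 (are_circularly_identical list1 list2)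
def Claim_changed_are_circularly_identical : Prop := Dom_are_circularly_identical (pvDiffWitness_are_circularly_identical.1) (pvDiffWitness_are_circularly_identical.2) ∧ D_are_circularly_identical (pvDiffWitness_are_circularly_identical.1) (pvDiffWitness_are_circularly_identical.2) ∧ are_circularly_identical (pvDiffWitness_are_circularly_identical.1) (pvDiffWitness_are_circularly_identical.2) = pvDiffWitnessOut_are_circularly_identical.1 ∧ are_circularly_identical_alt (pvDiffWitness_are_circularly_identical.1) (pvDiffWitness_are_circularly_identical.2) = pvDiffWitnessOut_are_circularly_identical.2 ∧ pvDiffWitnessOut_are_circularly_identical.1 ≠ pvDiffWitnessOut_are_circularly_identical.2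
def Claim_exact_are_circularly_identical : Prop := ∀ (list1 : List Int) (list2 : List Int), Dom_are_circularly_identical list1 list2 → D_are_circularly_identical list1 list2 → are_circularly_identical list1 list2 ≠ are_circularly_identical_alt list1 list2

-- ===== LEMMAS AND PROOFS =====

-- The index dict built by B's loop: looking up v yields exactly the positions of v, in order.
lemma buildIndex_getD (l : List Int) : ∀ (s : Int) (d : PySem.Dict Int (List Int)) (v : Int),
    ((PySem.List.enumerate l s).foldl (fun d p => d.insert p.2 (d.getD p.2 [] ++ [p.1])) d).getD v []
      = d.getD v [] ++ (PySem.List.enumerate l s).filterMap (fun p => if p.2 = v then some p.1 else none) := by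
  induction l with
  | nil => intro s d v; simp [PySem.List.enumerate_nil]
  | cons x xs ih =>
    intro s d v
    rw [PySem.List.enumerate_cons]
    simp only [List.foldl_cons, List.filterMap_cons]
    rw [ih]
    rw [PySem.Dict.getD_insert]
    by_cases hv : x = v
    · subst hv
      simp
    · simp [hv, Ne.symm hv]

-- Membership in the index list at v: exactly the in-range offsets where list1 carries v.
lemma mem_buildIndex (l : List Int) (v i : Int) :
    i ∈ (((PySem.List.enumerate l 0).foldl (fun d p => d.insert p.2 (d.getD p.2 [] ++ [p.1]))
          PySem.Dict.empty).getD v [])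
      ↔ ∃ (k : Nat) (h : k < l.length), (i : Int) = (k : Int) ∧ l[k] = v := by
  rw [buildIndex_getD]
  simp only [PySem.Dict.getD_empty, List.nil_append, List.mem_filterMap]
  constructor
  · rintro ⟨p, hp, hpi⟩
    rcases (PySem.List.mem_enumerate_iff _ _ _).1 hp with ⟨k, hk, rfl⟩
    by_cases h2 : l[k] = v
    · simp [h2] at hpi; exact ⟨k, hk, by omega, h2⟩
    · simp [h2] at hpi
  · rintro ⟨k, hk, rfl, hv⟩
    refine ⟨(0 + (k : Int), l[k]), ?_, by simp [hv]⟩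
    exact (PySem.List.mem_enumerate_iff _ _ _).2 ⟨k, hk, rfl⟩

-- A slice of length n of list1 ++ list1 starting at an in-range offset begins with list1[i].
lemma slice_head (l1 l2 : List Int) (hn : l1.length = l2.length) (k : Nat) (hk : k < l1.length)
    (hs : PySem.List.slice (l1 ++ l1) (some (k : Int)) (some ((k : Int) + (l2.length : Int))) = l2) :
    l2[0]? = some l1[k] := by
  rw [PySem.List.slice_natCast_add] at hs
  rw [← hs]
  have hlen : 0 < l2.length := by omega
  rw [List.getElem?_take_of_lt hlen, List.getElem?_drop, Nat.add_zero,
    List.getElem?_append_left (by omega)]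
  simp [hk]

theorem are_circularly_identical_spec : Claim_unchanged_are_circularly_identical := by
  intro l1 l2 _ hD
  unfold are_circularly_identical are_circularly_identical_alt
  by_cases hlen : l1.length ≠ l2.length
  · simp [hlen]
  · push Not at hlen
    simp only [hlen, ne_eq, not_true_eq_false, if_false]
    have hne : l2 ≠ [] := by
      intro h2
      exact hD ⟨by cases l1 with | nil => rfl | cons a t => simp [h2] at hlen, h2⟩
    rw [if_neg (by simpa [List.isEmpty_iff] using hne)]
    obtain ⟨h, t, rfl⟩ : ∃ h t, l2 = h :: t := by
      cases l2 with | nil => exact absurd rfl hne | cons a t => exact ⟨a, t, rfl⟩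
    have hget : PySem.List.pyGetD (h :: t) 0 0 = h := by simp [pysem]
    rw [hget]
    -- both sides are `any` of the same predicate over lists with the same relevant members
    apply Bool.eq_iff_iff.2
    simp only [List.any_eq_true, beq_iff_eq]
    constructor
    · rintro ⟨i, hi, hP⟩
      rcases (PySem.List.mem_pyRange_one).1 hi with ⟨h0, hlt⟩
      obtain ⟨k, rfl⟩ : ∃ k : Nat, i = (k : Int) := ⟨i.toNat, (Int.toNat_of_nonneg h0).symm⟩
      have hk : k < l1.length := by omega
      refine ⟨(k : Int), ?_, hP⟩
      apply (mem_buildIndex l1 h (k : Int)).2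
      refine ⟨k, hk, rfl, ?_⟩
      have := slice_head l1 (h :: t) hlen k hk hP
      simpa using this.symm
    · rintro ⟨i, hi, hP⟩
      rcases (mem_buildIndex l1 h i).1 hi with ⟨k, hk, rfl, _⟩
      refine ⟨(k : Int), (PySem.List.mem_pyRange_one).2 ⟨by omega, by omega⟩, hP⟩

-- ===== VERDICT (by name: the statement is the Claim_ definition above) =====
theorem are_circularly_identical_changed : Claim_changed_are_circularly_identical := by
  unfold Claim_changed_are_circularly_identical; decide

theorem are_circularly_identical_tight : Claim_exact_are_circularly_identical := by
  intro l1 l2 _ hD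
  rcases hD with ⟨rfl, rfl⟩
  decide
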